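-- pv_equiv track=rewrite | github.com/mryudistira21/festa-berau | streamlit_app.py | translate_date
-- ===== SOURCE A (Python) =====
-- def translate_date(raw_date):
--     day_mapping = {
--         "Senin": "Monday", "Selasa": "Tuesday", "Rabu": "Wednesday",
--         "Kamis": "Thursday", "Jumat": "Friday", "Sabtu": "Saturday",
--         "Minggu": "Sunday"
--     }
--     month_mapping = {
--         "Januari": "January", "Februari": "February", "Maret": "March",
--         "April": "April", "Mei": "May", "Juni": "June",
--         "Juli": "July", "Agustus": "August", "September": "September",
--         "Oktober": "October", "November": "November", "Desember": "December"
--     }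
--
--     for indo_day, eng_day in day_mapping.items():
--         raw_date = raw_date.replace(indo_day, eng_day)
--     for indo_month, eng_month in month_mapping.items():
--         raw_date = raw_date.replace(indo_month, eng_month)
--     return raw_date
-- ===== SOURCE B (Python) =====
-- import re
--
-- _MAPPING = {
--     "Senin": "Monday", "Selasa": "Tuesday", "Rabu": "Wednesday",
--     "Kamis": "Thursday", "Jumat": "Friday", "Sabtu": "Saturday",
--     "Minggu": "Sunday",
--     "Januari": "January", "Februari": "February", "Maret": "March",
--     "April": "April", "Mei": "May", "Juni": "June",
--     "Juli": "July", "Agustus": "August", "September": "September",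
--     "Oktober": "October", "November": "November", "Desember": "December",
-- }
-- _PATTERN = re.compile("|".join(map(re.escape, _MAPPING)))
--
--
-- def translate_date(raw_date):
--     # One left-to-right pass over the string: at each position the first
--     # matching Indonesian word (substring-level, like str.replace) is
--     # substituted by its English translation.
--     return _PATTERN.sub(lambda m: _MAPPING[m.group(0)], raw_date)
-- ===== Notes on version B (the rewrite author's own statement) =====
-- stated objective: idiomatic
-- what changed: Replaces 19 sequential full-string str.replace passes by one combined regex that rewrites every Indonesian day/month word in a single left-to-right pass; identical because no key is a prefix of another, keys/values start uppercase with lowercase interiors, and no value is prefix-comparable with any later key, so matches never overlap or arise from earlier substitutions.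
import Mathlib
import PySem

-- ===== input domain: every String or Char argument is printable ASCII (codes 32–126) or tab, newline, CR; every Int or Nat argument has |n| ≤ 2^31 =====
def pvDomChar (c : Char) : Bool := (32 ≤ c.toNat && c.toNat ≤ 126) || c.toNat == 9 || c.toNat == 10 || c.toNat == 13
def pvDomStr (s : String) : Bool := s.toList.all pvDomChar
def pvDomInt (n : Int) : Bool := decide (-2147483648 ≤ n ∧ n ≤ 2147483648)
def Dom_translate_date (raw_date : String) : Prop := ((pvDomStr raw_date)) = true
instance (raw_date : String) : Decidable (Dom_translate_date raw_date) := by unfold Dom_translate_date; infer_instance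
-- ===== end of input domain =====

-- B replaces A's 19 sequential full-string str.replace passes by ONE combined mapping and a
-- single left-to-right substitution pass (a regex alternation in Source B); same output, more idiomatic.

-- ===== PORT A =====
-- A's two dict literals, ported as association lists in insertion order (the order .items() yields).
def pvDayPairs : List (String × String) :=
  [("Senin", "Monday"), ("Selasa", "Tuesday"), ("Rabu", "Wednesday"),
   ("Kamis", "Thursday"), ("Jumat", "Friday"), ("Sabtu", "Saturday"),
   ("Minggu", "Sunday")]

def pvMonthPairs : List (String × String) :=
  [("Januari", "January"), ("Februari", "February"), ("Maret", "March"),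
   ("April", "April"), ("Mei", "May"), ("Juni", "June"),
   ("Juli", "July"), ("Agustus", "August"), ("September", "September"),
   ("Oktober", "October"), ("November", "November"), ("Desember", "December")]

-- the two for-loops: raw_date = raw_date.replace(k, v) for each pair, days then months
def translate_date (raw_date : String) : String :=
  let afterDays := pvDayPairs.foldl (fun s p => PySem.Str.replace s p.1 p.2) raw_date
  pvMonthPairs.foldl (fun s p => PySem.Str.replace s p.1 p.2) afterDays

-- ===== PORT B =====
-- Source B's combined mapping, in the same insertion order the '|'-alternation is built in.
def pvPairs : List (List Char × List Char) :=
  [("Senin".toList, "Monday".toList), ("Selasa".toList, "Tuesday".toList),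
   ("Rabu".toList, "Wednesday".toList), ("Kamis".toList, "Thursday".toList),
   ("Jumat".toList, "Friday".toList), ("Sabtu".toList, "Saturday".toList),
   ("Minggu".toList, "Sunday".toList),
   ("Januari".toList, "January".toList), ("Februari".toList, "February".toList),
   ("Maret".toList, "March".toList), ("April".toList, "April".toList),
   ("Mei".toList, "May".toList), ("Juni".toList, "June".toList),
   ("Juli".toList, "July".toList), ("Agustus".toList, "August".toList),
   ("September".toList, "September".toList), ("Oktober".toList, "October".toList),
   ("November".toList, "November".toList), ("Desember".toList, "December".toList)]

-- Hand port of re.sub with an alternation pattern (exact for this pattern of plain literal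
-- alternatives): scan left to right; at each position substitute the first alternative that
-- matches there and jump past it, otherwise keep the character.  The k.isEmpty test is only
-- a totality guard; every key in pvPairs is nonempty.
def pvMulti (ps : List (List Char × List Char)) (s : List Char) : List Char :=
  match s with
  | [] => []
  | c :: t =>
    match ps.find? (fun p => p.1.isPrefixOf (c :: t)) with
    | none => c :: pvMulti ps t
    | some (k, v) =>
      if hk : k.isEmpty then c :: pvMulti ps t
      else v ++ pvMulti ps ((c :: t).drop k.length)
  termination_by s.length
  decreasing_by
    all_goals simp only [List.length_drop, List.length_cons]
    all_goals try omega
    all_goals (have hne : k ≠ [] := by simpa [List.isEmpty_iff] using hk;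
               have := List.length_pos_iff.mpr hne; omega)

def translate_date_alt (raw_date : String) : String :=
  String.ofList (pvMulti pvPairs raw_date.toList)

-- ===== PRECONDITION & SPEC =====
def Spec_translate_date (raw_date : String) (out : String) : Prop := out = translate_date_alt raw_date
instance (raw_date : String) (out : String) : Decidable (Spec_translate_date raw_date out) := by unfold Spec_translate_date; infer_instance

-- ===== CLAIM (what is proved, stated in full; the proofs are below) =====
def Claim_equal_translate_date : Prop := ∀ (raw_date : String), Dom_translate_date raw_date → Spec_translate_date raw_date (translate_date raw_date)

-- ===== LEMMAS AND PROOFS =====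

-- word shape: first char uppercase A–Z, all later chars not uppercase
def pvUpper (c : Char) : Bool := decide ('A' ≤ c) && decide (c ≤ 'Z')

def pvGood (w : List Char) : Bool :=
  match w with
  | [] => false
  | c :: t => pvUpper c && t.all (fun d => !pvUpper d)

-- neither is a prefix of the other (in particular they differ)
def pvIncomp (a b : List Char) : Bool := !(a.isPrefixOf b) && !(b.isPrefixOf a)

-- the side conditions under which one simultaneous pass equals the chain of replaces
def pvOk : List (List Char × List Char) → Bool
  | [] => true
  | (k, v) :: ps =>
    pvGood k && pvGood v &&
      ps.all (fun p => pvGood p.1 && pvIncomp k p.1 && pvIncomp v p.1) && pvOk ps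

-- structural version of Python's s.replace(k, v) for nonempty k
def pvRep (k v : List Char) (s : List Char) : List Char :=
  match s with
  | [] => []
  | c :: t =>
    if h : k.isPrefixOf (c :: t) = true ∧ k.isEmpty = false then
      v ++ pvRep k v ((c :: t).drop k.length)
    else c :: pvRep k v t
  termination_by s.length
  decreasing_by
    all_goals simp only [List.length_drop, List.length_cons]
    all_goals try omega
    all_goals (have hne : k ≠ [] := by simpa [List.isEmpty_iff] using h.2;
               have := List.length_pos_iff.mpr hne; omega)

-- A's chained replaces, on char lists
def pvChain (ps : List (List Char × List Char)) (s : List Char) : List Char :=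
  ps.foldl (fun s p => PySem.Chars.replace s p.1 p.2) s

lemma pvGood_ne_nil {w : List Char} (h : pvGood w = true) : w ≠ [] := by
  cases w <;> simp [pvGood] at h ⊢

lemma pvGood_head {c : Char} {t : List Char} (h : pvGood (c :: t) = true) :
    pvUpper c = true ∧ ∀ d ∈ t, pvUpper d = false := by
  simp [pvGood, List.all_eq_true] at h
  exact ⟨h.1, h.2⟩

lemma pvIncomp_not_prefix {a b : List Char} (h : pvIncomp a b = true) :
    ¬ a <+: b ∧ ¬ b <+: a := by
  simp only [pvIncomp, Bool.and_eq_true, Bool.not_eq_eq_eq_not, Bool.not_true] at h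
  refine ⟨fun hp => ?_, fun hp => ?_⟩
  · rw [← List.isPrefixOf_iff_prefix] at hp; rw [h.1] at hp; exact Bool.false_ne_true hp
  · rw [← List.isPrefixOf_iff_prefix] at hp; rw [h.2] at hp; exact Bool.false_ne_true hp

lemma pvNotPrefix_head {k : List Char} (hk : pvGood k = true) {c : Char} {t : List Char}
    (hc : pvUpper c = false) : ¬ k <+: (c :: t) := by
  cases k with
  | nil => simp [pvGood] at hk
  | cons k0 kt =>
    intro hpre
    rw [List.cons_prefix_cons] at hpre
    rw [hpre.1] at hk
    have := (pvGood_head hk).1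
    rw [this] at hc
    exact absurd hc (by simp)

lemma pvIncomp_no_common {a b x : List Char} (ha : a <+: x) (hb : b <+: x)
    (h : pvIncomp a b = true) : False := by
  rcases List.prefix_or_prefix_of_prefix ha hb with h1 | h1
  · exact (pvIncomp_not_prefix h).1 h1
  · exact (pvIncomp_not_prefix h).2 h1

lemma pvOk_cons {k v : List Char} {ps : List (List Char × List Char)}
    (hok : pvOk ((k, v) :: ps) = true) :
    pvGood k = true ∧ pvGood v = true ∧
      (∀ p ∈ ps, pvGood p.1 = true ∧ pvIncomp k p.1 = true ∧ pvIncomp v p.1 = true) ∧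
      pvOk ps = true := by
  simp only [pvOk, Bool.and_eq_true, List.all_eq_true] at hok
  refine ⟨hok.1.1.1, hok.1.1.2, ?_, hok.2⟩
  intro p hp
  have := hok.1.2 p hp
  exact ⟨this.1.1, this.1.2, this.2⟩

-- pvRep equations
lemma pvRep_nil (k v : List Char) : pvRep k v [] = [] := by rw [pvRep]

lemma pvRep_cons_pos {k : List Char} (v : List Char) {c : Char} {t : List Char}
    (hp : k.isPrefixOf (c :: t) = true) (hk : k.isEmpty = false) :
    pvRep k v (c :: t) = v ++ pvRep k v ((c :: t).drop k.length) := by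
  rw [pvRep]; simp [hp, hk]

lemma pvRep_cons_neg {k : List Char} (v : List Char) {c : Char} {t : List Char}
    (hp : k.isPrefixOf (c :: t) = false) :
    pvRep k v (c :: t) = c :: pvRep k v t := by
  rw [pvRep]; simp [hp]

-- Python's replace loop (PySem.Chars.replace.go) computes pvRep
lemma pvGo (k v : List Char) (hk : k ≠ []) :
    ∀ (f : Nat) (l acc : List Char), l.length ≤ f →
      PySem.Chars.replace.go k v f l acc = acc.reverse ++ pvRep k v l := by
  intro f
  induction f with
  | zero =>
    intro l acc h
    have hl : l = [] := by cases l with | nil => rfl | cons a b => simp at h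
    subst hl
    rw [PySem.Chars.replace.go, pvRep_nil]
  | succ f ih =>
    intro l acc h
    cases l with
    | nil =>
      rw [PySem.Chars.replace.go, pvRep_nil]
      all_goals simp
    | cons c t =>
      rw [PySem.Chars.replace.go]
      by_cases hp : k.isPrefixOf (c :: t) = true
      · have hkE : k.isEmpty = false := by simpa [List.isEmpty_iff] using hk
        have hpos := List.length_pos_iff.mpr hk
        rw [if_pos hp, ih _ _ (by simp at h ⊢; omega), pvRep_cons_pos v hp hkE]
        simp
      · have hp' : k.isPrefixOf (c :: t) = false := Bool.eq_false_iff.mpr hp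
        rw [if_neg (by simp [hp']), ih t (c :: acc) (by simp at h ⊢; omega),
          pvRep_cons_neg v hp']
        simp

lemma pvReplace_eq (s k v : List Char) (hk : k ≠ []) :
    PySem.Chars.replace s k v = pvRep k v s := by
  have hkE : k.isEmpty = false := by simpa [List.isEmpty_iff] using hk
  rw [PySem.Chars.replace, if_neg (by simp [hkE]), pvGo k v hk s.length s [] le_rfl]
  simp

-- pvMulti equations
lemma pvMulti_nil (ps : List (List Char × List Char)) : pvMulti ps [] = [] := by simp [pvMulti]

lemma pvMulti_none {ps : List (List Char × List Char)} {c : Char} {t : List Char}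
    (h : ps.find? (fun p => p.1.isPrefixOf (c :: t)) = none) :
    pvMulti ps (c :: t) = c :: pvMulti ps t := by
  simp [pvMulti, h]

lemma pvMulti_some {ps : List (List Char × List Char)} {c : Char} {t k v : List Char}
    (h : ps.find? (fun p => p.1.isPrefixOf (c :: t)) = some (k, v))
    (hk : k.isEmpty = false) :
    pvMulti ps (c :: t) = v ++ pvMulti ps ((c :: t).drop k.length) := by
  simp [pvMulti, h, hk]

lemma pvMulti_nilps (s : List Char) : pvMulti [] s = s := by
  induction s with
  | nil => exact pvMulti_nil []
  | cons c t ih => rw [pvMulti_none (by simp), ih]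

-- skipping a block whose interior cannot start a k-match
lemma pvRep_skip (k v : List Char) :
    ∀ (w u : List Char), k.isPrefixOf (w ++ u) = false →
      (∀ c ∈ w.tail, pvUpper c = false) → pvGood k = true →
      pvRep k v (w ++ u) = w ++ pvRep k v u := by
  intro w
  induction w with
  | nil => intro u _ _ _; simp
  | cons x w' ih =>
    intro u h0 hw hk
    have hstep : pvRep k v (x :: (w' ++ u)) = x :: pvRep k v (w' ++ u) :=
      pvRep_cons_neg v (by simpa using h0)
    cases w' with
    | nil => simpa using hstep
    | cons y w'' =>
      have hy : pvUpper y = false := hw y (by simp)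
      have h0' : k.isPrefixOf ((y :: w'') ++ u) = false := by
        have := pvNotPrefix_head hk (t := w'' ++ u) hy
        simp only [List.cons_append]
        rw [← Bool.not_eq_true]
        simpa [List.isPrefixOf_iff_prefix] using this
      have hw' : ∀ c ∈ (y :: w'').tail, pvUpper c = false := by
        intro c hc; exact hw c (by simp at hc ⊢; tauto)
      calc pvRep k v ((x :: y :: w'') ++ u) = x :: pvRep k v ((y :: w'') ++ u) := hstep
        _ = x :: ((y :: w'') ++ pvRep k v u) := by rw [ih u h0' hw' hk]
        _ = (x :: y :: w'') ++ pvRep k v u := rfl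

-- leftmost decomposition of a replace
lemma pvRep_decomp (k v : List Char) (hk : k.isEmpty = false) :
    ∀ s, pvRep k v s = s ∨
      ∃ w u, s = w ++ k ++ u ∧ pvRep k v s = w ++ v ++ pvRep k v u := by
  intro s
  induction s with
  | nil => left; exact pvRep_nil k v
  | cons c t ih =>
    by_cases hp : k.isPrefixOf (c :: t) = true
    · right
      obtain ⟨u, hu⟩ := (List.isPrefixOf_iff_prefix).1 hp
      refine ⟨[], (c :: t).drop k.length, ?_, ?_⟩
      · rw [← hu, List.drop_left]; simp
      · rw [pvRep_cons_pos v hp hk]; simp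
    · have hp' : k.isPrefixOf (c :: t) = false := Bool.eq_false_iff.mpr hp
      rcases ih with h | ⟨w, u, hsu, hru⟩
      · left; rw [pvRep_cons_neg v hp', h]
      · right
        exact ⟨c :: w, u, by simp [hsu],
          by rw [pvRep_cons_neg v hp', hru]; simp⟩

-- a replace cannot create a new key-match at the front
lemma pvPres_not_prefix (k v k' : List Char) (hk : k.isEmpty = false)
    (hv : pvGood v = true) (hk' : pvGood k' = true) (hvk : pvIncomp v k' = true)
    (s : List Char) (h : ¬ k' <+: s) : ¬ k' <+: pvRep k v s := by
  rcases pvRep_decomp k v hk s with he | ⟨w, u, hs, hr⟩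
  · rw [he]; exact h
  · rw [hr]; intro hpre
    rw [List.append_assoc] at hpre
    have hwpre : w <+: w ++ (v ++ pvRep k v u) := ⟨v ++ pvRep k v u, rfl⟩
    by_cases hle : k'.length ≤ w.length
    · have hkw : k' <+: w := by
        rcases List.prefix_or_prefix_of_prefix hpre hwpre with h1 | h1
        · exact h1
        · rw [h1.eq_of_length_le hle]
      exact h (hkw.trans ⟨k ++ u, by simp [hs]⟩)
    · have hlt : w.length < k'.length := by omega
      have hwk : w <+: k' := by
        rcases List.prefix_or_prefix_of_prefix hwpre hpre with h1 | h1
        · exact h1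
        · exact absurd h1.length_le (by omega)
      obtain ⟨r, hr2⟩ := hwk
      have hrne : r ≠ [] := by
        intro h0; rw [h0] at hr2; simp at hr2; rw [← hr2] at hlt; omega
      have hrp : r <+: v ++ pvRep k v u := by
        have : w ++ r <+: w ++ (v ++ pvRep k v u) := by rw [hr2]; exact hpre
        exact (List.prefix_append_right_inj w).1 this
      cases w with
      | nil =>
        simp only [List.nil_append] at hr2
        rw [hr2] at hrp
        rcases List.prefix_or_prefix_of_prefix hrp ⟨pvRep k v u, rfl⟩ with h1 | h1
        · exact (pvIncomp_not_prefix hvk).2 h1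
        · exact (pvIncomp_not_prefix hvk).1 h1
      | cons x w' =>
        cases r with
        | nil => exact hrne rfl
        | cons r0 r' =>
          cases v with
          | nil => simp [pvGood] at hv
          | cons v0 v' =>
            have h00 : r0 = v0 := by
              have := hrp
              rw [List.cons_append, List.cons_prefix_cons] at this
              exact this.1
            have hup : pvUpper v0 = true := (pvGood_head hv).1
            have hmem : r0 ∈ (w' ++ r0 :: r') := by simp
            have hk'eq : k' = x :: (w' ++ r0 :: r') := by rw [← hr2]; rfl
            have hlow : pvUpper r0 = false := by
              have := (pvGood_head (hk'eq ▸ hk')).2 r0 hmem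
              exact this
            rw [h00, hup] at hlow
            exact absurd hlow (by simp)

-- a pass over non-uppercase characters copies them
lemma pvPass_low {ps : List (List Char × List Char)}
    (hps : ∀ p ∈ ps, pvGood p.1 = true) :
    ∀ (w u : List Char), (∀ c ∈ w, pvUpper c = false) →
      pvMulti ps (w ++ u) = w ++ pvMulti ps u := by
  intro w
  induction w with
  | nil => intro u _; simp
  | cons x w' ih =>
    intro u hw
    have hnone : ps.find? (fun p => p.1.isPrefixOf (x :: (w' ++ u))) = none := by
      rw [List.find?_eq_none]
      intro p hp hb
      exact pvNotPrefix_head (hps p hp) (hw x (by simp))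
        ((List.isPrefixOf_iff_prefix).1 hb)
    rw [List.cons_append, pvMulti_none hnone, ih u (fun c hc => hw c (by simp [hc]))]
    rfl

-- a pass copies an inserted value v untouched
lemma pvPass {v : List Char} {ps : List (List Char × List Char)}
    (hps : ∀ p ∈ ps, pvGood p.1 = true ∧ pvIncomp v p.1 = true)
    (hv : pvGood v = true) (u : List Char) :
    pvMulti ps (v ++ u) = v ++ pvMulti ps u := by
  cases v with
  | nil => simp
  | cons v0 v' =>
    have hnone : ps.find? (fun p => p.1.isPrefixOf (v0 :: (v' ++ u))) = none := by
      rw [List.find?_eq_none]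
      intro p hp hb
      have hpre : p.1 <+: (v0 :: v') ++ u := by
        rw [List.cons_append]; exact (List.isPrefixOf_iff_prefix).1 hb
      exact pvIncomp_no_common ⟨u, rfl⟩ hpre (hps p hp).2
    rw [List.cons_append, pvMulti_none hnone,
      pvPass_low (fun p hp => (hps p hp).1) v' u (pvGood_head hv).2]
    rfl

-- the found pair stays the first match after the text behind it changes
lemma pvFind_stable {ps : List (List Char × List Char)} (hok : pvOk ps = true)
    {s x k' v' : List Char}
    (h : ps.find? (fun p => p.1.isPrefixOf s) = some (k', v')) (hx : k' <+: x) :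
    ps.find? (fun p => p.1.isPrefixOf x) = some (k', v') := by
  induction ps with
  | nil => simp at h
  | cons p0 ps' ih =>
    obtain ⟨k0, v0⟩ := p0
    obtain ⟨-, -, hincs, hok'⟩ := pvOk_cons hok
    by_cases h0 : k0.isPrefixOf s = true
    · rw [List.find?_cons_of_pos (p := fun p => p.1.isPrefixOf s) (a := (k0, v0)) h0] at h
      have hk0 : k0 = k' ∧ v0 = v' := by
        have := h; simp at this; exact this
      rw [List.find?_cons_of_pos (p := fun p => p.1.isPrefixOf x) (a := (k0, v0))
        (by show k0.isPrefixOf x = true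
            rw [hk0.1]; exact (List.isPrefixOf_iff_prefix).2 hx)]
      rw [hk0.1, hk0.2]
    · rw [List.find?_cons_of_neg (p := fun p => p.1.isPrefixOf s) (a := (k0, v0)) h0] at h
      have hmem : (k', v') ∈ ps' := List.mem_of_find?_eq_some h
      have hinc : pvIncomp k0 k' = true := (hincs _ hmem).2.1
      have h0x : ¬ (fun p => p.1.isPrefixOf x) ((k0, v0) : List Char × List Char) = true := by
        intro hb
        exact pvIncomp_no_common ((List.isPrefixOf_iff_prefix).1 hb) hx hinc
      rw [List.find?_cons_of_neg (p := fun p => p.1.isPrefixOf x) (a := (k0, v0)) h0x]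
      exact ih hok' h

-- main step: passing with ((k,v)::ps) = replacing k first, then passing with ps
lemma pvMain (k v : List Char) (ps : List (List Char × List Char))
    (hok : pvOk ((k, v) :: ps) = true) :
    ∀ s, pvMulti ((k, v) :: ps) s = pvMulti ps (pvRep k v s) := by
  obtain ⟨hk, hv, hall, hokps⟩ := pvOk_cons hok
  have hkne : k ≠ [] := pvGood_ne_nil hk
  have hkE : k.isEmpty = false := by simpa [List.isEmpty_iff] using hkne
  have hkpos : 0 < k.length := List.length_pos_iff.mpr hkne
  suffices H : ∀ n s, s.length ≤ n → pvMulti ((k, v) :: ps) s = pvMulti ps (pvRep k v s) by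
    intro s; exact H s.length s le_rfl
  intro n
  induction n with
  | zero =>
    intro s hs
    have : s = [] := by cases s with | nil => rfl | cons a b => simp at hs
    subst this
    rw [pvMulti_nil, pvRep_nil, pvMulti_nil]
  | succ n ih =>
    intro s hs
    cases s with
    | nil => rw [pvMulti_nil, pvRep_nil, pvMulti_nil]
    | cons c t =>
      by_cases hp : k.isPrefixOf (c :: t) = true
      · -- k matches at the front: both sides emit v then continue after it
        have hfind : ((k, v) :: ps).find? (fun p => p.1.isPrefixOf (c :: t)) = some (k, v) :=
          List.find?_cons_of_pos (p := fun p => p.1.isPrefixOf (c :: t)) (a := (k, v)) hp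
        rw [pvMulti_some hfind hkE, pvRep_cons_pos v hp hkE,
          pvPass (fun p hp' => ⟨(hall p hp').1, (hall p hp').2.2⟩) hv,
          ih _ (by simp at hs ⊢; omega)]
      · have hp' : k.isPrefixOf (c :: t) = false := Bool.eq_false_iff.mpr hp
        have hfind0 : ((k, v) :: ps).find? (fun p => p.1.isPrefixOf (c :: t)) =
            ps.find? (fun p => p.1.isPrefixOf (c :: t)) :=
          List.find?_cons_of_neg (p := fun p => p.1.isPrefixOf (c :: t)) (a := (k, v))
            (by simp [hp'])
        cases hf : ps.find? (fun p => p.1.isPrefixOf (c :: t)) with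
        | some pr =>
          obtain ⟨k', v'⟩ := pr
          have hmem := List.mem_of_find?_eq_some hf
          have hk' : pvGood k' = true := (hall _ hmem).1
          have hk'ne : k' ≠ [] := pvGood_ne_nil hk'
          have hk'E : k'.isEmpty = false := by simpa [List.isEmpty_iff] using hk'ne
          have hk'pos : 0 < k'.length := List.length_pos_iff.mpr hk'ne
          have hkpre : k' <+: (c :: t) :=
            (List.isPrefixOf_iff_prefix).1
              (List.find?_some (p := fun q : List Char × List Char => q.1.isPrefixOf (c :: t)) hf)
          obtain ⟨u, hu⟩ := hkpre
          have hulen : u.length ≤ n := by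
            have hl := congrArg List.length hu
            simp only [List.length_append, List.length_cons] at hl
            have hs' : t.length + 1 ≤ n + 1 := by simpa using hs
            omega
          -- left side
          have hdrop : (c :: t).drop k'.length = u := by rw [← hu, List.drop_left]
          rw [pvMulti_some (hfind0.trans hf) hk'E, hdrop]
          -- right side: replace skips over k' and the pass still picks (k', v')
          have htail : ∀ d ∈ k'.tail, pvUpper d = false := by
            cases k' with
            | nil => simp
            | cons a b => exact (pvGood_head hk').2
          have hrs : pvRep k v (c :: t) = k' ++ pvRep k v u := by
            rw [← hu]; exact pvRep_skip k v k' u (by rw [hu]; exact hp') htail hk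
          rw [hrs]
          cases hk'c : k' with
          | nil => exact absurd hk'c hk'ne
          | cons k0 kt =>
            have hfx : ps.find? (fun p => p.1.isPrefixOf (k' ++ pvRep k v u)) =
                some (k', v') := pvFind_stable hokps hf ⟨pvRep k v u, rfl⟩
            rw [hk'c] at hfx
            rw [List.cons_append, pvMulti_some (by simpa using hfx) (by rw [hk'c] at hk'E; exact hk'E)]
            have hdrop2 : (k0 :: (kt ++ pvRep k v u)).drop (k0 :: kt).length = pvRep k v u := by
              rw [← List.cons_append, ← hk'c, List.drop_left]
            rw [hdrop2, ih u hulen]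
        | none =>
          have hrn : pvRep k v (c :: t) = c :: pvRep k v t := pvRep_cons_neg v hp'
          have hnone2 : ps.find? (fun p => p.1.isPrefixOf (c :: pvRep k v t)) = none := by
            rw [List.find?_eq_none]
            intro p hpm hb
            have hnpre : ¬ p.1 <+: (c :: t) := by
              have := (List.find?_eq_none.1 hf) p hpm
              simpa [List.isPrefixOf_iff_prefix] using this
            have := pvPres_not_prefix k v p.1 hkE hv (hall _ hpm).1 (hall _ hpm).2.2
              (c :: t) hnpre
            rw [hrn] at this
            exact this ((List.isPrefixOf_iff_prefix).1 hb)
          rw [pvMulti_none (hfind0.trans hf), hrn, pvMulti_none hnone2,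
            ih t (by simp at hs; omega)]

lemma pvChain_eq (M : List (List Char × List Char)) (hok : pvOk M = true) :
    ∀ s, pvChain M s = pvMulti M s := by
  induction M with
  | nil => intro s; simp [pvChain, pvMulti_nilps]
  | cons p M' ih =>
    obtain ⟨k, v⟩ := p
    obtain ⟨hk, -, -, hok'⟩ := pvOk_cons hok
    intro s
    have h1 : pvChain ((k, v) :: M') s = pvChain M' (PySem.Chars.replace s k v) := by
      simp [pvChain]
    rw [h1, pvReplace_eq s k v (pvGood_ne_nil hk), ih hok', pvMain k v M' hok]

lemma pvOk_pairs : pvOk pvPairs = true := by decide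

-- ===== VERDICT (by name: the statement is the Claim_ definition above) =====
theorem translate_date_spec : Claim_equal_translate_date := by
  intro raw _
  unfold Spec_translate_date
  have h1 : (translate_date raw).toList = pvChain pvPairs raw.toList := by
    simp [translate_date, pvDayPairs, pvMonthPairs, pvChain, pvPairs,
      List.foldl_cons, List.foldl_nil, PySem.Str.toList_replace]
  have h2 : (translate_date raw).toList = (translate_date_alt raw).toList := by
    rw [h1, pvChain_eq pvPairs pvOk_pairs raw.toList]
    simp [translate_date_alt]
  exact String.toList_injective h2
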